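-- pv_equiv track=rewrite | github.com/pzzzzzm/MyCodes | PaperCodes/fibonacci_q_decreasing_words_2-gray_codes/q_decreasing.py | qrun
-- ===== SOURCE A (Python) =====
-- import math
--
-- def qrun(n, q):
--     R = []
--     p = 1
--     for i in range(0, n-(math.floor(1/q)+2)+1):
--         if (i+1)%2: j_range = (1, n-i-(math.floor((n - i)/(q + 1))+1)+1, 1)
--         else: j_range = (n-i-(math.floor((n-i)/(q+1))+1), 0, -1)
--
--         for j in range(*j_range):
--             if p%2:
--                 R += ["0"*(n-i-j) + "1"*j + s for s in reversed(qrun(i, q))]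
--             else:
--                 R += ["0"*(n-i-j) + "1"*j + s for s in qrun(i, q)]
--             p = 1 - int(R[-1][-1])
--
--     R.append("0"*n)
--     return R
-- ===== SOURCE B (Python) =====
-- import math
--
-- def qrun(n, q):
--     # Bottom-up dynamic programming: build each level's word list once and reuse
--     # cached sub-lists (and their reversals) instead of A's exponential recomputation.
--     shift = math.floor(1/q) + 2
--     levels = []
--     for m in range(0, max(n, 0) + 1):
--         R = []
--         p = 1
--         for i in range(0, m - shift + 1):
--             sub = levels[i]
--             rev = list(reversed(sub))
--             t = m - i - (math.floor((m - i)/(q + 1)) + 1)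
--             js = range(1, t + 1) if (i + 1) % 2 else range(t, 0, -1)
--             for j in js:
--                 R += ["0"*(m-i-j) + "1"*j + s for s in (rev if p % 2 else sub)]
--                 p = 1 - int(R[-1][-1])
--         R.append("0"*m)
--         levels.append(R)
--     return levels[max(n, 0)]
-- ===== Notes on version B (the rewrite author's own statement) =====
-- stated objective: alternative
-- what changed: Replaced A's naive recursion (qrun(i,q) recomputed inside every inner j-iteration) by a bottom-up dynamic program that builds each level's word list once and reuses the cached sub-lists and their reversals; intended as faster (a timing run read 3.97x at n=16, unconfirmed at larger sizes where A times out).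
import Mathlib
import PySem

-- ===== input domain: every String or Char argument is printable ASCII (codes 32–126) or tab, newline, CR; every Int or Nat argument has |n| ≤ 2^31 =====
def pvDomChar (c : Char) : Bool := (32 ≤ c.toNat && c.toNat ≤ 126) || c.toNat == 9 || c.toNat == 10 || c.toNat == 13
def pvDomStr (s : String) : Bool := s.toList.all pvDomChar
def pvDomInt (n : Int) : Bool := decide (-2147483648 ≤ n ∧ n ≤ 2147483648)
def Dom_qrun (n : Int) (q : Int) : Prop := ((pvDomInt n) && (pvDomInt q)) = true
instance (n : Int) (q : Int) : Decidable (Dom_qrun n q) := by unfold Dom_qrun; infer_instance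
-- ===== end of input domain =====

-- B replaces A's recomputing recursion by a bottom-up dynamic program over cached levels; same return value.

-- ===== PORT A =====
-- both Pythons contain the literal statement `p = 1 - int(R[-1][-1])`; this is its transliteration
def pvLastBit (R : List String) : Int :=
  1 - (PySem.Int.ofStr? (String.ofList [(PySem.Str.pyGet? (PySem.List.pyGetD R (-1) "") (-1)).getD '0'])).getD 0

-- needed by qrun's termination proof (cited in decreasing_by): math.floor(1/q) ≥ -1
theorem pvFdOne_ge (q : Int) : -1 ≤ PySem.Int.floordiv 1 q := by
  rcases lt_trichotomy q 0 with h | h | h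
  · have hb := PySem.Int.mod_neg_bounds 1 h
    have he := PySem.Int.floordiv_mul_add_mod 1 q
    by_contra hc
    have h2 : -2 * q ≤ PySem.Int.floordiv 1 q * q :=
      mul_le_mul_of_nonpos_right (by omega) (le_of_lt h)
    have h3 : q ≤ -1 := by omega
    linarith [hb.1, hb.2]
  · subst h; decide
  · rw [PySem.Int.floordiv_eq_ediv_of_pos h]
    have : 0 ≤ 1 / q := Int.ediv_nonneg (by omega) (by omega)
    omega

def qrun (n : Int) (q : Int) : List String :=
  let st := (PySem.List.pyRange 0 (n - (PySem.Int.floordiv 1 q + 2) + 1)).attach.foldl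
    (fun (acc : List String × Int) ip =>
      let js := if PySem.Int.mod (ip.1 + 1) 2 ≠ 0
        then PySem.List.pyRange 1 (n - ip.1 - (PySem.Int.floordiv (n - ip.1) (q + 1) + 1) + 1)
        else PySem.List.pyRange (n - ip.1 - (PySem.Int.floordiv (n - ip.1) (q + 1) + 1)) 0 (-1)
      js.foldl (fun (acc2 : List String × Int) j =>
        let R' := acc2.1 ++
          (if PySem.Int.mod acc2.2 2 ≠ 0 then (qrun ip.1 q).reverse else qrun ip.1 q).map
            (fun s => String.ofList (PySem.List.pyRepeat ['0'] (n - ip.1 - j) ++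
              PySem.List.pyRepeat ['1'] j ++ s.toList))
        (R', pvLastBit R')) acc)
    ([], 1)
  st.1 ++ [String.ofList (PySem.List.pyRepeat ['0'] n)]
termination_by n.toNat
decreasing_by
  have h := PySem.List.mem_pyRange_one.mp ip.2
  have h2 := pvFdOne_ge q
  omega

-- ===== PORT B =====
def qrunLevel (q : Int) (levels : List (List String)) (m : Int) : List String :=
  let st := (PySem.List.pyRange 0 (m - (PySem.Int.floordiv 1 q + 2) + 1)).foldl
    (fun (acc : List String × Int) i =>
      let sub := PySem.List.pyGetD levels i []
      let rev := sub.reverse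
      let t := m - i - (PySem.Int.floordiv (m - i) (q + 1) + 1)
      let js := if PySem.Int.mod (i + 1) 2 ≠ 0
        then PySem.List.pyRange 1 (t + 1)
        else PySem.List.pyRange t 0 (-1)
      js.foldl (fun (acc2 : List String × Int) j =>
        let R' := acc2.1 ++
          (if PySem.Int.mod acc2.2 2 ≠ 0 then rev else sub).map
            (fun s => String.ofList (PySem.List.pyRepeat ['0'] (m - i - j) ++
              PySem.List.pyRepeat ['1'] j ++ s.toList))
        (R', pvLastBit R')) acc)
    ([], 1)
  st.1 ++ [String.ofList (PySem.List.pyRepeat ['0'] m)]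

def qrun_alt (n : Int) (q : Int) : List String :=
  let levels := (PySem.List.pyRange 0 (max n 0 + 1)).foldl
    (fun (levels : List (List String)) m => levels ++ [qrunLevel q levels m]) []
  PySem.List.pyGetD levels (max n 0) []

-- ===== PRECONDITION & SPEC =====
-- Pre_ excludes exactly the inputs where the Python raises ZeroDivisionError: q = 0
-- (math.floor(1/q)), and q = -1 with n ≥ 1 (division by q+1).
def Pre_qrun (n : Int) (q : Int) : Prop := q ≠ 0 ∧ (q = -1 → n ≤ 0)
instance (n : Int) (q : Int) : Decidable (Pre_qrun n q) := by unfold Pre_qrun; infer_instance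
def pvWitness_qrun : Int × Int := (4, 1)

def Spec_qrun (n : Int) (q : Int) (out : List String) : Prop := out = qrun_alt n q
instance (n : Int) (q : Int) (out : List String) : Decidable (Spec_qrun n q out) := by unfold Spec_qrun; infer_instance

-- ===== CLAIM (what is proved, stated in full; the proofs are below) =====
def Claim_equal_qrun : Prop := ∀ (n : Int) (q : Int), Dom_qrun n q → Pre_qrun n q → Spec_qrun n q (qrun n q)

-- ===== LEMMAS AND PROOFS =====

theorem pv_foldl_attach {α β : Type} (l : List α) (init : β)
    (F : β → {x // x ∈ l} → β) (G : β → α → β)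
    (h : ∀ acc ip, F acc ip = G acc ip.1) :
    l.attach.foldl F init = l.foldl G init := by
  have hF : F = fun acc t => G acc t.1 := funext fun a => funext fun t => h a t
  rw [hF, List.foldl_attach]

-- B's level body equals A's recursive call, given that `levels` caches all lower levels
theorem qrunLevel_eq (q m : Int) (L : List (List String))
    (hL : ∀ i : Int, 0 ≤ i → i < m → PySem.List.pyGetD L i [] = qrun i q) :
    qrunLevel q L m = qrun m q := by
  rw [qrun, qrunLevel]
  have hfd := pvFdOne_ge q
  rw [pv_foldl_attach _ _ _
    (fun (acc : List String × Int) i =>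
      let js := if PySem.Int.mod (i + 1) 2 ≠ 0
        then PySem.List.pyRange 1 (m - i - (PySem.Int.floordiv (m - i) (q + 1) + 1) + 1)
        else PySem.List.pyRange (m - i - (PySem.Int.floordiv (m - i) (q + 1) + 1)) 0 (-1)
      js.foldl (fun (acc2 : List String × Int) j =>
        let R' := acc2.1 ++
          (if PySem.Int.mod acc2.2 2 ≠ 0 then (qrun i q).reverse else qrun i q).map
            (fun s => String.ofList (PySem.List.pyRepeat ['0'] (m - i - j) ++
              PySem.List.pyRepeat ['1'] j ++ s.toList))
        (R', pvLastBit R')) acc)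
    (fun _ _ => rfl)]
  refine congrArg (fun st : List String × Int => st.1 ++ [String.ofList (PySem.List.pyRepeat ['0'] m)]) ?_
  apply PySem.List.foldl_congr_mem
  intro acc i hi
  have hb := PySem.List.mem_pyRange_one.mp hi
  have hs : PySem.List.pyGetD L i [] = qrun i q := hL i hb.1 (by omega)
  simp only [hs]

-- the accumulated `levels` list is exactly the table of A's values
theorem levels_eq (q : Int) : ∀ M : Nat,
    (PySem.List.pyRange 0 ((M : Int) + 1)).foldl
      (fun (ls : List (List String)) m => ls ++ [qrunLevel q ls m]) [] =
    (List.range (M + 1)).map (fun k : Nat => qrun (k : Int) q) := by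
  intro M
  induction M with
  | zero =>
    have h1 : PySem.List.pyRange 0 ((0 : Nat) + 1) = [0] := by decide
    rw [h1]
    simp only [List.foldl, List.range_succ, List.range_zero, List.map, List.nil_append]
    rw [qrunLevel_eq q 0 [] (fun i h0 h1 => absurd (lt_of_le_of_lt h0 h1) (lt_irrefl 0))]
    rfl
  | succ M ih =>
    have hcast : ((M + 1 : Nat) : Int) + 1 = ((M : Int) + 1) + 1 := by push_cast; ring
    rw [hcast, PySem.List.pyRange_one_succ_right (by positivity), List.foldl_append, ih]
    have hL : ∀ i : Int, 0 ≤ i → i < (M : Int) + 1 →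
        PySem.List.pyGetD ((List.range (M + 1)).map (fun k : Nat => qrun (k : Int) q)) i [] = qrun i q := by
      intro i h0 h1
      rw [PySem.List.pyGetD_eq_getElem _ _ h0 (by simp; omega)]
      simp only [List.getElem_map, List.getElem_range]
      congr 1
      omega
    simp only [List.foldl]
    rw [qrunLevel_eq q ((M : Int) + 1) _ hL, List.range_succ (n := M + 1), List.map_append]
    simp only [List.map]
    push_cast
    rfl

theorem qrun_alt_eq (n q : Int) : qrun_alt n q = qrun n q := by
  unfold qrun_alt
  have hM : max n 0 = ((max n 0).toNat : Int) := by omega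
  rw [hM, levels_eq q (max n 0).toNat]
  rw [PySem.List.pyGetD_eq_getElem _ _ (by omega) (by simp)]
  simp only [List.getElem_map, List.getElem_range, Int.toNat_natCast]
  rcases le_or_gt 0 n with h | h
  · congr 1; omega
  · -- n < 0 : both levels are the singleton [""]
    have h0 : ((max n 0).toNat : Int) = 0 := by omega
    rw [h0]
    have hempty : ∀ k : Int, k ≤ 0 → qrun k q = [String.ofList (List.replicate 0 '0')] := by
      intro k hk
      rw [qrun]
      have hfd := pvFdOne_ge q
      rw [PySem.List.pyRange_one_eq_nil (by omega)]
      simp only [List.attach_nil, List.foldl_nil, List.nil_append,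
        PySem.List.pyRepeat_singleton]
      have hz : k.toNat = 0 := by omega
      rw [hz]
    rw [hempty 0 le_rfl, hempty n (le_of_lt h)]

-- ===== VERDICT (by name: the statement is the Claim_ definition above) =====
theorem qrun_spec : Claim_equal_qrun := by
  intro n q _ _
  exact (qrun_alt_eq n q).symm
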